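-- pv_equiv track=rewrite | github.com/Julie12Yu/casework_vis | merge_embeddings.py | remap_labels_away_from
-- ===== SOURCE A (Python) =====
-- def is_int_like(x):
--     try:
--         int(x)
--         return True
--     except Exception:
--         return False
--
-- def remap_labels_away_from(existing_labels_outside_cluster, recluster_labels):
--     """
--     Make sure recluster labels don't collide with existing ones.
--     We take max int label outside the big cluster + 1 as the base.
--     """
--     ints = [int(l) for l in existing_labels_outside_cluster if is_int_like(l)]
--     base = (max(ints) + 1) if ints else 0
--
--     remap = {}
--     next_label = base
--     mapped = []
--     for l in recluster_labels:
--         key = int(l) if is_int_like(l) else str(l)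
--         if key == -1:
--             mapped.append(-1)
--             continue
--         if key not in remap:
--             remap[key] = next_label
--             next_label += 1
--         mapped.append(remap[key])
--     return mapped, remap
-- ===== SOURCE B (Python) =====
-- def is_int_like(x):
--     try:
--         int(x)
--         return True
--     except Exception:
--         return False
--
-- def remap_labels_away_from(existing_labels_outside_cluster, recluster_labels):
--     """
--     Sort-based ranking: record each non-(-1) key's FIRST index with a single
--     backward overwrite pass, then sort the keys by that index; the sorted rank
--     (offset by base) is the fresh label.  Correct because first-occurrence
--     order is exactly ascending order of first indices.
--     """
--     ints = [int(l) for l in existing_labels_outside_cluster if is_int_like(l)]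
--     base = (max(ints) + 1) if ints else 0
--
--     keys = [int(l) if is_int_like(l) else str(l) for l in recluster_labels]
--     first = {}
--     for i, k in reversed(list(enumerate(keys))):
--         if k != -1:
--             first[k] = i
--     order = sorted(first, key=first.get)
--     remap = {k: base + r for r, k in enumerate(order)}
--     mapped = [-1 if k == -1 else remap[k] for k in keys]
--     return mapped, remap
-- ===== Notes on version B (the rewrite author's own statement) =====
-- stated objective: alternative
-- what changed: A grows the remap table lazily inside the single output loop; B instead computes each non-(-1) key's first-occurrence index with one backward overwrite pass, SORTS the keys by that index, and uses the sorted rank plus base as the fresh label, then maps in a lookup-only pass - a sort-based ranking rather than incremental assignment.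
import Mathlib
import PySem

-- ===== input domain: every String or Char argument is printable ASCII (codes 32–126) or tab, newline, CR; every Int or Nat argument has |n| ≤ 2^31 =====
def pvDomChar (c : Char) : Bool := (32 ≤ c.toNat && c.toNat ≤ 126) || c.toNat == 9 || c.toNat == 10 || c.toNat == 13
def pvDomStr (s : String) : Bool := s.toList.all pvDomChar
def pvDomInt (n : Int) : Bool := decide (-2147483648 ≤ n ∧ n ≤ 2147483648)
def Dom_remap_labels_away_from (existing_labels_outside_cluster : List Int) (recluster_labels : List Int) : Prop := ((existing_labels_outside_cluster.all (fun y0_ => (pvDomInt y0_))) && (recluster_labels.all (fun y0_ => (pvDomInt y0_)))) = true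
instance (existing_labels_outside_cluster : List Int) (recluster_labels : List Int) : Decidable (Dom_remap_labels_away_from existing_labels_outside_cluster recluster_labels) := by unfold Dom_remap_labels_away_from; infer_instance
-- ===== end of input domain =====

-- B ranks each distinct non-(-1) key by sorting on its first-occurrence index (recorded by a
-- backward overwrite pass) instead of A's lazy table growth inside the output loop; objective: alternative.


-- ===== PORT A =====
-- the body of A's for-loop over recluster_labels (state: remap dict, next_label, mapped);
-- on Int inputs is_int_like(l) is always True and int(l) = l, so key = l
def pvStepA (st : PySem.Dict Int Int × Int × List Int) (l : Int) : PySem.Dict Int Int × Int × List Int :=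
  let remap := st.1
  let next_label := st.2.1
  let mapped := st.2.2
  let key := l
  if key = -1 then (remap, next_label, mapped ++ [(-1 : Int)])
  else if remap.contains key then
    -- key already in remap: mapped.append(remap[key]) (present, default never read)
    (remap, next_label, mapped ++ [remap.getD key 0])
  else
    -- fresh key: insert, bump next_label, then remap[key] = next_label is appended
    (remap.insert key next_label, next_label + 1, mapped ++ [next_label])

-- on Int inputs the is_int_like filter keeps everything, so ints = existing_labels_outside_cluster
def remap_labels_away_from (existing_labels_outside_cluster : List Int) (recluster_labels : List Int) : List Int × (List (Int × Int)) :=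
  let ints := existing_labels_outside_cluster
  let base : Int := match PySem.List.max? ints id with
    | some m => m + 1
    | none => 0
  let st := recluster_labels.foldl pvStepA (PySem.Dict.mk [], base, ([] : List Int))
  (st.2.2, st.1.items)

-- ===== PORT B =====
-- B's backward pass 'for i, k in reversed(list(enumerate(keys))): if k != -1: first[k] = i'
def pvFirst (keys : List Int) : PySem.Dict Int Int :=
  ((PySem.List.enumerate keys 0).reverse).foldl
    (fun d p => if p.2 = -1 then d else d.insert p.2 p.1) PySem.Dict.empty

def remap_labels_away_from_alt (existing_labels_outside_cluster : List Int) (recluster_labels : List Int) : List Int × (List (Int × Int)) :=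
  let ints := existing_labels_outside_cluster
  let base : Int := match PySem.List.max? ints id with
    | some m => m + 1
    | none => 0
  let keys := recluster_labels
  let first := pvFirst keys
  -- order = sorted(first, key=first.get); every key is present so first.get k = first[k]
  let order := PySem.List.sorted first.keys (fun k => first.getD k 0) false
  let remap := (PySem.List.enumerate order).map (fun p => (p.2, base + p.1))
  let mapped := keys.map (fun k => if k = -1 then (-1 : Int) else (PySem.Dict.mk remap).getD k 0)
  (mapped, remap)

-- ===== PRECONDITION & SPEC =====
def Spec_remap_labels_away_from (existing_labels_outside_cluster : List Int) (recluster_labels : List Int) (out : List Int × (List (Int × Int))) : Prop := out = remap_labels_away_from_alt existing_labels_outside_cluster recluster_labels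
instance (existing_labels_outside_cluster : List Int) (recluster_labels : List Int) (out : List Int × (List (Int × Int))) : Decidable (Spec_remap_labels_away_from existing_labels_outside_cluster recluster_labels out) := by unfold Spec_remap_labels_away_from; infer_instance

-- ===== CLAIM (what is proved, stated in full; the proofs are below) =====
def Claim_equal_remap_labels_away_from : Prop := ∀ (existing_labels_outside_cluster : List Int) (recluster_labels : List Int), Dom_remap_labels_away_from existing_labels_outside_cluster recluster_labels → Spec_remap_labels_away_from existing_labels_outside_cluster recluster_labels (remap_labels_away_from existing_labels_outside_cluster recluster_labels)

-- ===== LEMMAS AND PROOFS =====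

-- the ordered list of keys A has assigned after processing `rest`, starting from `s`
def pvExtend (s : List Int) (rest : List Int) : List Int :=
  rest.foldl (fun s k => if k = -1 then s else if k ∈ s then s else s ++ [k]) s

-- the items list of a remap dict whose keys, in order, are `ks` with values v, v+1, …
def pvPairs (v : Int) : List Int → List (Int × Int)
  | [] => []
  | k :: ks => (k, v) :: pvPairs (v + 1) ks

theorem pvExtend_cons (s : List Int) (x : Int) (r : List Int) :
    pvExtend s (x :: r) = pvExtend (if x = -1 then s else if x ∈ s then s else s ++ [x]) r := by
  simp [pvExtend]

theorem pvPairs_append (v : Int) (l1 l2 : List Int) :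
    pvPairs v (l1 ++ l2) = pvPairs v l1 ++ pvPairs (v + l1.length) l2 := by
  induction l1 generalizing v with
  | nil => simp [pvPairs]
  | cons a t ih => simp [pvPairs, ih (v + 1)]; ring_nf

theorem pvEnum_map (base : Int) (order : List Int) (s : Int) :
    (PySem.List.enumerate order s).map (fun p => (p.2, base + p.1)) = pvPairs (base + s) order := by
  induction order generalizing s with
  | nil => simp [pvPairs]
  | cons a t ih =>
    rw [PySem.List.enumerate_cons]
    simp [pvPairs, ih (s + 1)]
    ring_nf

theorem pvContains_pairs (v : Int) (s : List Int) (k : Int) :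
    (PySem.Dict.mk (pvPairs v s)).contains k = decide (k ∈ s) := by
  induction s generalizing v with
  | nil => simp [pvPairs, PySem.Dict.contains]
  | cons a t ih =>
    simp only [pvPairs, PySem.Dict.contains, List.any_cons] at *
    by_cases h : a = k
    · simp [h]
    · simp [h, Ne.symm h, ih (v + 1)]

theorem pvGetD_prefix (v : Int) (s : List Int) (t : List (Int × Int)) (k : Int) (hk : k ∈ s) :
    (PySem.Dict.mk (pvPairs v s ++ t)).getD k 0 = (PySem.Dict.mk (pvPairs v s)).getD k 0 := by
  induction s generalizing v with
  | nil => simp at hk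
  | cons a s' ih =>
    simp only [pvPairs, List.cons_append]
    rw [PySem.Dict.getD, PySem.Dict.getD, PySem.Dict.get?_mk_cons, PySem.Dict.get?_mk_cons]
    by_cases h : a = k
    · simp [h]
    · simp only [beq_iff_eq, h, if_false]
      have hk' : k ∈ s' := by cases hk with
        | head => exact absurd rfl h
        | tail _ h2 => exact h2
      have := ih (v + 1) hk'
      simp only [PySem.Dict.getD] at this
      exact this

theorem pvGetD_last (v : Int) (s : List Int) (k : Int) (hk : k ∉ s) :
    (PySem.Dict.mk (pvPairs v (s ++ [k]))).getD k 0 = v + s.length := by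
  induction s generalizing v with
  | nil => simp [pvPairs, PySem.Dict.getD, PySem.Dict.get?]
  | cons a s' ih =>
    simp only [List.cons_append, pvPairs]
    have ha : a ≠ k := fun h => hk (h ▸ List.mem_cons_self ..)
    rw [PySem.Dict.getD, PySem.Dict.get?_mk_cons]
    simp only [beq_iff_eq, ha, if_false]
    have := ih (v + 1) (fun h => hk (List.mem_cons_of_mem _ h))
    rw [PySem.Dict.getD] at this
    rw [this]
    simp; ring

theorem pvExtend_prefix (rest : List Int) : ∀ s : List Int, ∃ t, pvExtend s rest = s ++ t := by
  induction rest with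
  | nil => intro s; exact ⟨[], by simp [pvExtend]⟩
  | cons x r ih =>
    intro s
    rw [pvExtend_cons]
    by_cases hx : x = -1
    · simpa [hx] using ih s
    · by_cases hm : x ∈ s
      · simpa [hx, hm] using ih s
      · obtain ⟨t, ht⟩ := ih (s ++ [x])
        exact ⟨[x] ++ t, by simpa [hx, hm] using ht⟩

theorem pvGetD_extend (v : Int) (s rest : List Int) (k : Int) (hk : k ∈ s) :
    (PySem.Dict.mk (pvPairs v (pvExtend s rest))).getD k 0 = (PySem.Dict.mk (pvPairs v s)).getD k 0 := by
  obtain ⟨t, ht⟩ := pvExtend_prefix rest s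
  rw [ht, pvPairs_append]
  exact pvGetD_prefix v s _ k hk

-- the A-side loop, characterised by the final dedup list
theorem pvLoopA (base : Int) (rest : List Int) : ∀ (s : List Int) (acc : List Int),
    rest.foldl pvStepA (PySem.Dict.mk (pvPairs base s), base + s.length, acc)
    = (PySem.Dict.mk (pvPairs base (pvExtend s rest)), base + (pvExtend s rest).length,
       acc ++ rest.map (fun k => if k = -1 then (-1 : Int)
                                 else (PySem.Dict.mk (pvPairs base (pvExtend s rest))).getD k 0)) := by
  induction rest with
  | nil => intro s acc; simp [pvExtend]
  | cons x r ih =>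
    intro s acc
    rw [List.foldl_cons, pvExtend_cons, List.map_cons]
    by_cases hx : x = -1
    · rw [if_pos hx]
      have hstep : pvStepA (PySem.Dict.mk (pvPairs base s), base + (s.length : Int), acc) x
          = (PySem.Dict.mk (pvPairs base s), base + (s.length : Int), acc ++ [(-1 : Int)]) := by
        simp [pvStepA, hx]
      rw [hstep, ih s (acc ++ [(-1 : Int)])]
      simp [hx]
    · rw [if_neg hx]
      by_cases hm : x ∈ s
      · rw [if_pos hm]
        have hc : (PySem.Dict.mk (pvPairs base s)).contains x = true := by
          rw [pvContains_pairs]; simpa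
        have hstep : pvStepA (PySem.Dict.mk (pvPairs base s), base + (s.length : Int), acc) x
            = (PySem.Dict.mk (pvPairs base s), base + (s.length : Int),
               acc ++ [(PySem.Dict.mk (pvPairs base s)).getD x 0]) := by
          simp [pvStepA, hx, hc]
        rw [hstep, ih s (acc ++ [(PySem.Dict.mk (pvPairs base s)).getD x 0])]
        rw [pvGetD_extend base s r x hm]
        simp [hx]
      · rw [if_neg hm]
        have hc : (PySem.Dict.mk (pvPairs base s)).contains x = false := by
          rw [pvContains_pairs]; simpa
        have hins : (PySem.Dict.mk (pvPairs base s)).insert x (base + s.length)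
            = PySem.Dict.mk (pvPairs base (s ++ [x])) := by
          rw [PySem.Dict.insert, hc]
          simp [pvPairs_append, pvPairs]
        have hstep : pvStepA (PySem.Dict.mk (pvPairs base s), base + (s.length : Int), acc) x
            = (PySem.Dict.mk (pvPairs base (s ++ [x])), base + ((s ++ [x]).length : Int),
               acc ++ [base + (s.length : Int)]) := by
          simp [pvStepA, hx, hc, hins, Prod.ext_iff]
          ring
        rw [hstep, ih (s ++ [x]) (acc ++ [base + (s.length : Int)])]
        have hx0 : (PySem.Dict.mk (pvPairs base (pvExtend (s ++ [x]) r))).getD x 0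
            = base + (s.length : Int) := by
          rw [pvGetD_extend base (s ++ [x]) r x (by simp)]
          exact pvGetD_last base s x hm
        rw [hx0]
        simp [hx]

-- ===== B-side: the first-index dict and the sorted order =====

-- pvFirst as a foldr over the enumerate pairs (index 0 is inserted LAST)
def pvFirstAux (ps : List (Int × Int)) : PySem.Dict Int Int :=
  ps.foldr (fun p d => if p.2 = -1 then d else d.insert p.2 p.1) PySem.Dict.empty

theorem pvFirst_eq_aux (keys : List Int) : pvFirst keys = pvFirstAux (PySem.List.enumerate keys 0) := by
  rw [pvFirst, pvFirstAux, List.foldl_reverse]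

theorem pvFirstAux_nodup_keys (ps : List (Int × Int)) : (pvFirstAux ps).keys.Nodup := by
  induction ps with
  | nil => exact PySem.Dict.nodup_keys_empty
  | cons p t ih =>
    simp only [pvFirstAux, List.foldr_cons]
    by_cases h : p.2 = -1
    · simpa [h] using ih
    · simpa [h] using PySem.Dict.nodup_keys_insert _ _ _ ih

-- lookup in the first-index dict: the FIRST occurrence index of k, offset by the start s
theorem pvFirst_get? (keys : List Int) : ∀ s : Int, ∀ k : Int,
    (pvFirstAux (PySem.List.enumerate keys s)).get? k
    = if k ∈ keys ∧ k ≠ -1 then some (s + (keys.idxOf k : Int)) else none := by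
  induction keys with
  | nil => intro s k; simp [pvFirstAux, PySem.List.enumerate_nil]
  | cons x t ih =>
    intro s k
    rw [PySem.List.enumerate_cons]
    simp only [pvFirstAux, List.foldr_cons] at *
    by_cases hx : x = -1
    · rw [if_pos hx]
      rw [ih (s + 1) k]
      by_cases hk : k ∈ t ∧ k ≠ -1
      · have hkx : k ≠ x := fun h => hk.2 (h.trans hx)
        rw [if_pos hk, if_pos ⟨List.mem_cons_of_mem _ hk.1, hk.2⟩]
        rw [List.idxOf_cons_ne _ (by exact fun h => hkx h.symm)]
        simp; ring
      · have : ¬ (k ∈ x :: t ∧ k ≠ -1) := by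
          rintro ⟨hm, hne⟩
          cases hm with
          | head => exact hne hx
          | tail _ h2 => exact hk ⟨h2, hne⟩
        rw [if_neg hk, if_neg this]
    · rw [if_neg hx]
      by_cases hkx : k = x
      · subst hkx
        rw [PySem.Dict.get?_insert_self]
        rw [if_pos ⟨List.mem_cons_self .., hx⟩, List.idxOf_cons_self]
        simp
      · rw [PySem.Dict.get?_insert_of_ne _ _ hkx, ih (s + 1) k]
        by_cases hk : k ∈ t ∧ k ≠ -1
        · rw [if_pos hk, if_pos ⟨List.mem_cons_of_mem _ hk.1, hk.2⟩]
          rw [List.idxOf_cons_ne _ (by exact fun h => hkx h.symm)]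
          simp; ring
        · have : ¬ (k ∈ x :: t ∧ k ≠ -1) := by
            rintro ⟨hm, hne⟩
            cases hm with
            | head => exact hkx rfl
            | tail _ h2 => exact hk ⟨h2, hne⟩
          rw [if_neg hk, if_neg this]

theorem pvFirst_mem_keys (keys : List Int) (k : Int) :
    k ∈ (pvFirst keys).keys ↔ k ∈ keys ∧ k ≠ -1 := by
  rw [pvFirst_eq_aux]
  have hg := pvFirst_get? keys 0 k
  constructor
  · intro h
    by_contra hc
    rw [if_neg hc] at hg
    exact ((PySem.Dict.get?_eq_none_iff_not_mem_keys _ _).mp hg) h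
  · intro h
    rw [if_pos h] at hg
    by_contra hnm
    rw [(PySem.Dict.get?_eq_none_iff_not_mem_keys _ _).mpr hnm] at hg
    simp at hg

theorem pvFirst_getD (keys : List Int) (k : Int) (h : k ∈ keys ∧ k ≠ -1) :
    (pvFirst keys).getD k 0 = (keys.idxOf k : Int) := by
  rw [pvFirst_eq_aux, PySem.Dict.getD_eq_get?_getD, pvFirst_get? keys 0 k, if_pos h]
  simp

-- pvExtend membership and nodup
theorem pvExtend_mem (rest : List Int) : ∀ s x, x ∈ pvExtend s rest ↔ x ∈ s ∨ (x ∈ rest ∧ x ≠ -1) := by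
  induction rest with
  | nil => intro s x; simp [pvExtend]
  | cons a r ih =>
    intro s x
    rw [pvExtend_cons]
    by_cases ha : a = -1
    · rw [if_pos ha, ih s x]
      constructor
      · rintro (h | ⟨h1, h2⟩)
        · exact Or.inl h
        · exact Or.inr ⟨List.mem_cons_of_mem _ h1, h2⟩
      · rintro (h | ⟨h1, h2⟩)
        · exact Or.inl h
        · cases h1 with
          | head => exact absurd ha h2
          | tail _ h3 => exact Or.inr ⟨h3, h2⟩
    · rw [if_neg ha]
      by_cases hm : a ∈ s
      · rw [if_pos hm, ih s x]
        constructor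
        · rintro (h | ⟨h1, h2⟩)
          · exact Or.inl h
          · exact Or.inr ⟨List.mem_cons_of_mem _ h1, h2⟩
        · rintro (h | ⟨h1, h2⟩)
          · exact Or.inl h
          · cases h1 with
            | head => exact Or.inl hm
            | tail _ h3 => exact Or.inr ⟨h3, h2⟩
      · rw [if_neg hm, ih (s ++ [a]) x]
        simp only [List.mem_append, List.mem_cons, List.not_mem_nil, or_false]
        constructor
        · rintro ((h | h) | ⟨h1, h2⟩)
          · exact Or.inl h
          · exact Or.inr ⟨Or.inl h, h ▸ ha⟩
          · exact Or.inr ⟨Or.inr h1, h2⟩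
        · rintro (h | ⟨(h1 | h1), h2⟩)
          · exact Or.inl (Or.inl h)
          · exact Or.inl (Or.inr h1)
          · exact Or.inr ⟨h1, h2⟩

theorem pvExtend_nodup (rest : List Int) : ∀ s : List Int, s.Nodup → (pvExtend s rest).Nodup := by
  induction rest with
  | nil => intro s h; simpa [pvExtend] using h
  | cons a r ih =>
    intro s hs
    rw [pvExtend_cons]
    by_cases ha : a = -1
    · rw [if_pos ha]; exact ih s hs
    · rw [if_neg ha]
      by_cases hm : a ∈ s
      · rw [if_pos hm]; exact ih s hs
      · rw [if_neg hm]
        refine ih (s ++ [a]) ?_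
        rw [List.nodup_append]
        refine ⟨hs, List.nodup_singleton _, ?_⟩
        intro b hb c hc
        rw [List.mem_singleton.mp hc]
        exact fun hba => hm (hba ▸ hb)

-- the central order fact: A's first-occurrence list is strictly increasing in idxOf over the full list
theorem pvExtend_pairwise_aux (L : List Int) : ∀ (rest p s : List Int), p ++ rest = L →
    (∀ a, a ∈ s ↔ a ∈ p ∧ a ≠ -1) →
    s.Pairwise (fun a b => L.idxOf a < L.idxOf b) →
    (pvExtend s rest).Pairwise (fun a b => L.idxOf a < L.idxOf b) := by
  intro rest
  induction rest with
  | nil => intro p s _ _ hp; simpa [pvExtend] using hp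
  | cons x r ih =>
    intro p s hL hinv hp
    rw [pvExtend_cons]
    by_cases hx : x = -1
    · rw [if_pos hx]
      refine ih (p ++ [x]) s (by simpa using hL) (fun a => ?_) hp
      rw [hinv a]
      constructor
      · rintro ⟨h1, h2⟩; exact ⟨List.mem_append_left _ h1, h2⟩
      · rintro ⟨h1, h2⟩
        rcases List.mem_append.mp h1 with h | h
        · exact ⟨h, h2⟩
        · exact absurd (List.mem_singleton.mp h ▸ hx) h2
    · rw [if_neg hx]
      by_cases hm : x ∈ s
      · rw [if_pos hm]
        refine ih (p ++ [x]) s (by simpa using hL) (fun a => ?_) hp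
        rw [hinv a]
        constructor
        · rintro ⟨h1, h2⟩; exact ⟨List.mem_append_left _ h1, h2⟩
        · rintro ⟨h1, h2⟩
          rcases List.mem_append.mp h1 with h | h
          · exact ⟨h, h2⟩
          · exact ⟨(List.mem_singleton.mp h) ▸ ((hinv x).mp hm).1, h2⟩
      · rw [if_neg hm]
        have hxp : x ∉ p := fun hh => hm ((hinv x).mpr ⟨hh, hx⟩)
        have hidx_x : L.idxOf x = p.length := by
          rw [← hL, List.idxOf_append_of_notMem hxp, List.idxOf_cons_self]
          simp
        have hlt : ∀ a ∈ s, L.idxOf a < L.idxOf x := by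
          intro a ha
          have hap : a ∈ p := ((hinv a).mp ha).1
          rw [hidx_x, ← hL, List.idxOf_append_of_mem hap]
          exact List.idxOf_lt_length_of_mem hap
        have hp' : (s ++ [x]).Pairwise (fun a b => L.idxOf a < L.idxOf b) := by
          rw [List.pairwise_append]
          exact ⟨hp, List.pairwise_singleton _ _, fun a ha b hb => (List.mem_singleton.mp hb) ▸ hlt a ha⟩
        refine ih (p ++ [x]) (s ++ [x]) (by simpa using hL) (fun a => ?_) hp'
        simp only [List.mem_append, List.mem_singleton]
        constructor
        · rintro (h | h)
          · exact ⟨Or.inl ((hinv a).mp h).1, ((hinv a).mp h).2⟩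
          · exact ⟨Or.inr h, h ▸ hx⟩
        · rintro ⟨(h1 | h1), h2⟩
          · exact Or.inl ((hinv a).mpr ⟨h1, h2⟩)
          · exact Or.inr h1

-- B's sorted order IS A's first-occurrence dedup list
theorem pvOrder_eq (re : List Int) :
    PySem.List.sorted (pvFirst re).keys (fun k => (pvFirst re).getD k 0) false = pvExtend [] re := by
  have hmem : ∀ x, x ∈ pvExtend [] re ↔ x ∈ (pvFirst re).keys := by
    intro x
    rw [pvExtend_mem re [] x, pvFirst_mem_keys]
    simp
  have hperm : (pvExtend [] re).Perm (pvFirst re).keys := by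
    rw [List.perm_ext_iff_of_nodup (pvExtend_nodup re [] List.nodup_nil)
      (pvFirst_eq_aux re ▸ pvFirstAux_nodup_keys _)]
    exact hmem
  have hidx : (pvExtend [] re).Pairwise (fun a b => re.idxOf a < re.idxOf b) :=
    pvExtend_pairwise_aux re re [] [] (by simp) (by simp) List.Pairwise.nil
  have hpw : (pvExtend [] re).Pairwise
      (fun a b => (pvFirst re).getD a 0 < (pvFirst re).getD b 0) := by
    refine List.Pairwise.imp_of_mem (fun {a b} ha hb h => ?_) hidx
    have ha' := (pvExtend_mem re [] a).mp ha
    have hb' := (pvExtend_mem re [] b).mp hb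
    simp only [List.not_mem_nil, false_or] at ha' hb'
    rw [pvFirst_getD re a ha', pvFirst_getD re b hb']
    exact_mod_cast h
  exact PySem.List.sorted_eq_of_perm_of_pairwise_lt _ _ _ hperm hpw

-- ===== VERDICT (by name: the statement is the Claim_ definition above) =====
theorem remap_labels_away_from_spec : Claim_equal_remap_labels_away_from := by
  intro ex re _
  unfold Spec_remap_labels_away_from remap_labels_away_from remap_labels_away_from_alt
  simp only []
  set base : Int := (match PySem.List.max? ex id with
    | some m => m + 1
    | none => 0) with hbase
  have horder := pvOrder_eq re
  have henum : (PySem.List.enumerate (pvExtend [] re) 0).map (fun p => (p.2, base + p.1))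
      = pvPairs base (pvExtend [] re) := by
    have := pvEnum_map base (pvExtend [] re) 0
    simpa using this
  have hloop := pvLoopA base re [] []
  simp only [pvPairs, List.length_nil, Nat.cast_zero, add_zero, List.nil_append] at hloop
  rw [hloop, horder, henum]
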